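-- pv_equiv track=rewrite | github.com/Jmcassociates/Lottery-Oracle-Core | lottery_math_engine.py | generate_wheeled_tickets
-- ===== SOURCE A (Python) =====
-- import itertools
--
-- def generate_wheeled_tickets(pool, special_pool, num_tickets, numbers_per_ticket=5):
--     """
--     JMc - The "Pragmatist". Takes the generated pool and applies a Greedy Combinatorial Wheel.
--     It generates exactly `num_tickets` by iteratively selecting the combination that provides
--     the highest number of previously uncovered triplets (3-number matches).
--     This minimizes overlap and mathematically maximizes the "net" you cast over the pool.
--     """
--     # Generate all possible 5-number combinations from our 15-number pool (~3,003 combinations)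
--     all_possible_tickets = list(itertools.combinations(pool, numbers_per_ticket))
--
--     covered_triplets = set()
--     selected_tickets = []
--
--     # Cap requested tickets to the mathematical maximum combinations
--     num_tickets = min(num_tickets, len(all_possible_tickets))
--
--     for _ in range(num_tickets):
--         best_ticket = None
--         best_new_coverage = -1
--
--         # Evaluate every possible remaining ticket
--         for ticket in all_possible_tickets:
--             if ticket in selected_tickets:
--                 continue
--
--             # A 5-number ticket contains 10 triplets
--             ticket_triplets = set(itertools.combinations(ticket, 3))
--
--             # How many of these triplets have we NOT covered yet?
--             new_coverage = len(ticket_triplets - covered_triplets)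
--
--             if new_coverage > best_new_coverage:
--                 best_new_coverage = new_coverage
--                 best_ticket = ticket
--
--         if best_ticket:
--             selected_tickets.append(best_ticket)
--             covered_triplets.update(itertools.combinations(best_ticket, 3))
--
--     # Attach the special balls (round-robin style to ensure distribution)
--     final_tickets = []
--     for i, t in enumerate(selected_tickets):
--         sb = special_pool[i % len(special_pool)]
--         final_tickets.append((list(t), sb))
--
--     return final_tickets
-- ===== SOURCE B (Python) =====
-- import itertools
--
-- def generate_wheeled_tickets(pool, special_pool, num_tickets, numbers_per_ticket=5):
--     """
--     Recursive greedy wheel over a shrinking candidate list: each round the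
--     first ticket maximizing uncovered-triplet count is taken with max(key=...)
--     and removed from the remaining list (no membership re-scan against the
--     selected list); specials are attached by zipping with itertools.cycle.
--     """
--     tickets = list(itertools.combinations(pool, numbers_per_ticket))
--     rounds = min(num_tickets, len(tickets))
--
--     def wheel(remaining, covered, rounds):
--         if rounds <= 0 or not remaining:
--             return []
--         ticket, tris = max(remaining, key=lambda p: len(p[1] - covered))
--         rest = [p for p in remaining if p[0] != ticket]
--         return [ticket] + wheel(rest, covered | tris, rounds - 1)
--
--     chosen = wheel([(t, set(itertools.combinations(t, 3))) for t in tickets],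
--                    set(), rounds)
--     return [(list(t), s) for t, s in zip(chosen, itertools.cycle(special_pool))]
-- ===== Notes on version B (the rewrite author's own statement) =====
-- stated objective: alternative
-- what changed: B is a recursion over a shrinking remaining-candidates list (picked ticket's entries are filtered out, so there is no per-round membership re-scan against the selected list), the round's winner is taken with max(key=uncovered-triplet count) over precomputed triplet sets, and specials are attached by zipping with itertools.cycle instead of enumerate with index modulo.
-- outside the precondition, e.g. on generate_wheeled_tickets([1, 2, 3], [9], 1, 0): A returns [], B returns [([], 9)]
import Mathlib
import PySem

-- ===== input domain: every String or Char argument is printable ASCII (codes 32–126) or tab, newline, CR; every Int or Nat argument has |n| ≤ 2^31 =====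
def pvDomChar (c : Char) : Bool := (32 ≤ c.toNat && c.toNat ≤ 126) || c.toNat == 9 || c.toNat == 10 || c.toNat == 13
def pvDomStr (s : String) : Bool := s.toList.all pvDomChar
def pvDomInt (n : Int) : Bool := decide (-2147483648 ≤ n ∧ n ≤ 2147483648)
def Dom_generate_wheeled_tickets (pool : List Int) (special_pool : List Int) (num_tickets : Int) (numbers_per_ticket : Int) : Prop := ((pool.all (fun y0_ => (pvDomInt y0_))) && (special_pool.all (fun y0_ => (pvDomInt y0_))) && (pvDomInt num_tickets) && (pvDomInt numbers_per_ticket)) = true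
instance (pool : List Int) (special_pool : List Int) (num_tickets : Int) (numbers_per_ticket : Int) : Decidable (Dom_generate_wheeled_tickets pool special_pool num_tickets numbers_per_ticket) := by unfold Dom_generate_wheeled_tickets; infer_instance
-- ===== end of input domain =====

-- B replaces A's indexed greedy loop (membership re-scan against the selected list each round) by a
-- recursion over a shrinking remaining list picked with max(key=…) and a cycle-zip tail (objective: alternative).

-- ===== PORT A =====
-- A's inner scan: for ticket in all_possible_tickets: … (accumulator = (best_ticket, best_new_coverage))
def pickA (tickets : List (List Int)) (selected : List (List Int)) (covered : PySem.Set (List Int)) :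
    Option (List Int) × Int :=
  tickets.foldl
    (fun b ticket =>
      if ticket ∈ selected then b
      else
        let new_coverage : Int :=
          PySem.Set.len (PySem.Set.diff (PySem.Set.ofList (PySem.List.combinations ticket 3)) covered)
        if new_coverage > b.2 then (some ticket, new_coverage) else b)
    (none, -1)

-- one round of A's greedy loop; Python's `if best_ticket:` is falsy for None and for the empty tuple
def stepA (tickets : List (List Int)) (st : List (List Int) × PySem.Set (List Int)) :
    List (List Int) × PySem.Set (List Int) :=
  match (pickA tickets st.1 st.2).1 with
  | some t =>
      if t = [] then st
      else (st.1 ++ [t], PySem.Set.update st.2 (PySem.List.combinations t 3))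
  | none => st

-- Python raises ValueError for a negative numbers_per_ticket (excluded by Pre_), so .toNat is exact on Pre_'s domain
def generate_wheeled_tickets (pool : List Int) (special_pool : List Int) (num_tickets : Int) (numbers_per_ticket : Int) : List (List Int × Int) :=
  let all_possible_tickets := PySem.List.combinations pool numbers_per_ticket.toNat
  let st :=
    (List.range (min num_tickets (PySem.List.len all_possible_tickets)).toNat).foldl
      (fun st _ => stepA all_possible_tickets st) ([], PySem.Set.empty)
  (PySem.List.enumerate st.1 0).map
    (fun p => (p.2, PySem.List.pyGetD special_pool (PySem.Int.mod p.1 (PySem.List.len special_pool)) 0))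

-- ===== PORT B =====
-- the pair (t, set(itertools.combinations(t, 3))) built for each candidate ticket
def pairB (t : List Int) : List Int × PySem.Set (List Int) :=
  (t, PySem.Set.ofList (PySem.List.combinations t 3))

-- B's recursive `wheel`: max(remaining, key=…) picks the first maximizer (Python max keeps the first),
-- the picked ticket's entries are filtered out and its triplets unioned into `covered`
def wheelB : Nat → List (List Int × PySem.Set (List Int)) → PySem.Set (List Int) → List (List Int)
  | 0, _, _ => []
  | Nat.succ k, remaining, covered =>
    if remaining = [] then []
    else
      match PySem.List.max? remaining (fun p => PySem.Set.len (PySem.Set.diff p.2 covered)) with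
      | none => []   -- unreachable: remaining ≠ [] here (Python's max never sees an empty list)
      | some pick =>
        pick.1 :: wheelB k (remaining.filter (fun p => decide (p.1 ≠ pick.1)))
          (PySem.Set.union covered pick.2)

-- zip(chosen, itertools.cycle(special_pool)): walk `chosen` consuming a rotating copy of special_pool
def cycleZip (orig : List Int) : List (List Int) → List Int → List (List Int × Int)
  | [], _ => []
  | _ :: _, [] => []          -- cycle of an empty special_pool yields nothing, zip stops
  | t :: ts, s :: srest => (t, s) :: cycleZip orig ts (if srest = [] then orig else srest)

def generate_wheeled_tickets_alt (pool : List Int) (special_pool : List Int) (num_tickets : Int) (numbers_per_ticket : Int) : List (List Int × Int) :=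
  let tickets := PySem.List.combinations pool numbers_per_ticket.toNat
  let rounds := (min num_tickets (PySem.List.len tickets)).toNat
  let chosen := wheelB rounds (tickets.map pairB) PySem.Set.empty
  cycleZip special_pool chosen special_pool

-- ===== PRECONDITION & SPEC =====
-- Pre_ excludes numbers_per_ticket ≤ 0 (negative raises ValueError in A; at 0 A's falsy empty-tuple
-- guard silently drops the only, degenerate, zero-length ticket — a corner nobody specifies) and
-- inputs with an empty special_pool where at least one ticket gets selected (A raises ZeroDivisionError).
def Pre_generate_wheeled_tickets (pool : List Int) (special_pool : List Int) (num_tickets : Int) (numbers_per_ticket : Int) : Prop :=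
  1 ≤ numbers_per_ticket ∧
    (special_pool ≠ [] ∨ num_tickets ≤ 0 ∨ (pool.length : Int) < numbers_per_ticket)
instance (pool : List Int) (special_pool : List Int) (num_tickets : Int) (numbers_per_ticket : Int) : Decidable (Pre_generate_wheeled_tickets pool special_pool num_tickets numbers_per_ticket) := by unfold Pre_generate_wheeled_tickets; infer_instance

def pvWitness_generate_wheeled_tickets : List Int × List Int × Int × Int := ([1, 2, 3, 4], [7], 2, 3)

def Spec_generate_wheeled_tickets (pool : List Int) (special_pool : List Int) (num_tickets : Int) (numbers_per_ticket : Int) (out : List (List Int × Int)) : Prop := out = generate_wheeled_tickets_alt pool special_pool num_tickets numbers_per_ticket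
instance (pool : List Int) (special_pool : List Int) (num_tickets : Int) (numbers_per_ticket : Int) (out : List (List Int × Int)) : Decidable (Spec_generate_wheeled_tickets pool special_pool num_tickets numbers_per_ticket out) := by unfold Spec_generate_wheeled_tickets; infer_instance

-- ===== CLAIM (what is proved, stated in full; the proofs are below) =====
def Claim_equal_generate_wheeled_tickets : Prop := ∀ (pool : List Int) (special_pool : List Int) (num_tickets : Int) (numbers_per_ticket : Int), Dom_generate_wheeled_tickets pool special_pool num_tickets numbers_per_ticket → Pre_generate_wheeled_tickets pool special_pool num_tickets numbers_per_ticket → Spec_generate_wheeled_tickets pool special_pool num_tickets numbers_per_ticket (generate_wheeled_tickets pool special_pool num_tickets numbers_per_ticket)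

-- ===== LEMMAS AND PROOFS =====

-- B's selection key: the number of a candidate's triplets not yet covered
def keyB (cov : PySem.Set (List Int)) (p : List Int × PySem.Set (List Int)) : Int :=
  PySem.Set.len (PySem.Set.diff p.2 cov)

-- relation between A's (best_ticket, best_new_coverage) accumulator and max?'s accumulator
def RelPk (cov : PySem.Set (List Int)) (a : Option (List Int) × Int)
    (b : Option (List Int × PySem.Set (List Int))) : Prop :=
  (a = (none, -1) ∧ b = none) ∨ ∃ t, a = (some t, keyB cov (pairB t)) ∧ b = some (pairB t)

-- Python max's fold step (max? unfolds to a foldl of this shape)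
def fmax (cov : PySem.Set (List Int)) (acc : Option (List Int × PySem.Set (List Int)))
    (x : List Int × PySem.Set (List Int)) : Option (List Int × PySem.Set (List Int)) :=
  match acc with
  | none => some x
  | some m => if keyB cov m < keyB cov x then some x else some m

lemma max?_eq_foldl_fmax (cov : PySem.Set (List Int)) (xs : List (List Int × PySem.Set (List Int))) :
    PySem.List.max? xs (fun p => PySem.Set.len (PySem.Set.diff p.2 cov)) = xs.foldl (fmax cov) none := by
  unfold PySem.List.max?
  apply PySem.List.foldl_congr_mem
  intro acc x _
  cases acc <;> rfl

-- A's strict-> scan and Python max's strict-< fold keep related accumulators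
lemma fold_rel (cov : PySem.Set (List Int)) :
    ∀ (l : List (List Int)) (a : Option (List Int) × Int)
      (b : Option (List Int × PySem.Set (List Int))), RelPk cov a b →
      RelPk cov
        (l.foldl
          (fun b ticket =>
            let new_coverage : Int :=
              PySem.Set.len (PySem.Set.diff (PySem.Set.ofList (PySem.List.combinations ticket 3)) cov)
            if new_coverage > b.2 then (some ticket, new_coverage) else b) a)
        ((l.map pairB).foldl (fmax cov) b) := by
  intro l
  induction l with
  | nil => intro a b h; exact h
  | cons u l ih =>
    intro a b h
    simp only [List.map_cons, List.foldl_cons]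
    rcases h with ⟨ha, hb⟩ | ⟨t, ha, hb⟩
    · subst ha; subst hb
      have hnn : (0 : Int) ≤ keyB cov (pairB u) := by
        simp [keyB, PySem.Set.len]
      have hgt : keyB cov (pairB u) > (-1 : Int) := by omega
      simp only [show keyB cov (pairB u)
          = PySem.Set.len (PySem.Set.diff (PySem.Set.ofList (PySem.List.combinations u 3)) cov) from rfl] at hgt
      simp only [hgt, if_pos, fmax]
      exact ih _ _ (Or.inr ⟨u, rfl, rfl⟩)
    · subst ha; subst hb
      have hk : PySem.Set.len (PySem.Set.diff (PySem.Set.ofList (PySem.List.combinations u 3)) cov)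
          = keyB cov (pairB u) := rfl
      by_cases hc : keyB cov (pairB t) < keyB cov (pairB u)
      · have hgt : keyB cov (pairB u) > keyB cov (pairB t) := hc
        simp only [hk, hgt, if_pos, fmax]
        exact ih _ _ (Or.inr ⟨u, rfl, rfl⟩)
      · have hgt : ¬ keyB cov (pairB u) > keyB cov (pairB t) := hc
        simp only [hk, hgt, fmax, if_false]
        exact ih _ _ (Or.inr ⟨t, rfl, rfl⟩)

-- A's scan with the `in selected` skip is the scan over the not-yet-selected tickets
lemma pickA_filter (tks sel : List (List Int)) (cov : PySem.Set (List Int)) :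
    pickA tks sel cov
      = (tks.filter (fun t => decide (t ∉ sel))).foldl
          (fun b ticket =>
            let new_coverage : Int :=
              PySem.Set.len (PySem.Set.diff (PySem.Set.ofList (PySem.List.combinations ticket 3)) cov)
            if new_coverage > b.2 then (some ticket, new_coverage) else b) (none, -1) := by
  unfold pickA
  rw [PySem.List.foldl_congr_mem
    (g := fun b ticket =>
      if ticket ∉ sel then
        (let new_coverage : Int :=
          PySem.Set.len (PySem.Set.diff (PySem.Set.ofList (PySem.List.combinations ticket 3)) cov)
        if new_coverage > b.2 then (some ticket, new_coverage) else b)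
      else b)]
  · exact PySem.List.foldl_ite_eq_foldl_filter (fun t => t ∉ sel) _ tks (none, -1)
  · intro acc x _
    by_cases hx : x ∈ sel <;> simp [hx]

-- the result of A's scan versus Python max over the remaining pairs
lemma pick_char (tks sel : List (List Int)) (cov : PySem.Set (List Int)) :
    RelPk cov (pickA tks sel cov)
      (((tks.filter (fun t => decide (t ∉ sel))).map pairB).foldl (fmax cov) none) := by
  rw [pickA_filter]
  exact fold_rel cov (tks.filter (fun t => decide (t ∉ sel))) (none, -1) none
    (Or.inl ⟨rfl, rfl⟩)

lemma wheelB_nil (n : Nat) (cov : PySem.Set (List Int)) : wheelB n [] cov = [] := by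
  cases n <;> simp [wheelB]

-- both covered-set updates agree: cov | tris  =  cov.update(combinations(t, 3))
lemma covered_eq (cov : PySem.Set (List Int)) (t : List Int) :
    PySem.Set.union cov (pairB t).2 = PySem.Set.update cov (PySem.List.combinations t 3) := by
  show PySem.Set.update cov (PySem.Set.ofList (PySem.List.combinations t 3))
      = PySem.Set.update cov (PySem.List.combinations t 3)
  rw [PySem.Set.update_eq_append_filter, PySem.Set.update_eq_append_filter,
    PySem.Set.ofList_ofList]

-- removing the picked ticket from the remaining pairs = filtering the not-yet-selected tickets
lemma remaining_step (tks sel : List (List Int)) (t : List Int) :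
    ((tks.filter (fun u => decide (u ∉ sel))).map pairB).filter (fun p => decide (p.1 ≠ t))
      = (tks.filter (fun u => decide (u ∉ sel ++ [t]))).map pairB := by
  rw [List.filter_map, List.filter_filter]
  congr 1
  apply List.filter_congr
  intro u _
  by_cases h1 : u = t <;> by_cases h2 : u ∈ sel <;> simp [pairB, h1, h2]

-- A's whole greedy loop produces, after any prefix `sel`, exactly B's recursive wheel
lemma loop_eq (tks : List (List Int)) (ht : ∀ t ∈ tks, t ≠ []) :
    ∀ (n : Nat) (sel : List (List Int)) (cov : PySem.Set (List Int)),
      ((List.range n).foldl (fun st _ => stepA tks st) (sel, cov)).1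
        = sel ++ wheelB n ((tks.filter (fun t => decide (t ∉ sel))).map pairB) cov := by
  intro n
  induction n with
  | zero => intro sel cov; simp [wheelB]
  | succ m ih =>
    intro sel cov
    have hpeel : (List.range (m + 1)).foldl (fun st _ => stepA tks st) (sel, cov)
        = (List.range m).foldl (fun st _ => stepA tks st) (stepA tks (sel, cov)) := by
      simp [List.range_succ_eq_map, List.foldl_map]
    rw [hpeel]
    have hrel := pick_char tks sel cov
    by_cases hrem : tks.filter (fun t => decide (t ∉ sel)) = []
    · -- nothing remains: the round is a no-op on both sides
      rw [hrem] at hrel ⊢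
      have hmax : (([] : List (List Int)).map pairB).foldl (fmax cov) none = none := rfl
      rw [hmax] at hrel
      rcases hrel with ⟨ha, _⟩ | ⟨t, _, hb⟩
      · have hstep : stepA tks (sel, cov) = (sel, cov) := by
          unfold stepA; rw [show (pickA tks sel cov).1 = none from by rw [ha]]
        rw [hstep, ih sel cov, hrem]
        simp [wheelB_nil, wheelB]
      · exact absurd hb (by simp)
    · -- the same ticket is picked by A's scan and by B's max
      have hmapne : (tks.filter (fun t => decide (t ∉ sel))).map pairB ≠ [] := by
        simpa using hrem
      rcases hrel with ⟨_, hb⟩ | ⟨t, ha, hb⟩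
      · have : PySem.List.max? ((tks.filter (fun t => decide (t ∉ sel))).map pairB)
            (fun p => PySem.Set.len (PySem.Set.diff p.2 cov)) = none := by
          rw [max?_eq_foldl_fmax]; exact hb
        exact absurd ((PySem.List.max?_eq_none_iff _ _).mp this) hmapne
      · have hbmax : PySem.List.max? ((tks.filter (fun t => decide (t ∉ sel))).map pairB)
            (fun p => PySem.Set.len (PySem.Set.diff p.2 cov)) = some (pairB t) := by
          rw [max?_eq_foldl_fmax]; exact hb
        have htmem : t ∈ tks := by
          have := PySem.List.max?_mem hbmax
          rcases List.mem_map.mp this with ⟨u, hu, hup⟩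
          have : u = t := congrArg Prod.fst hup
          subst this
          exact List.mem_of_mem_filter hu
        have htne : t ≠ [] := ht t htmem
        have hstep : stepA tks (sel, cov)
            = (sel ++ [t], PySem.Set.update cov (PySem.List.combinations t 3)) := by
          unfold stepA
          rw [show (pickA tks sel cov).1 = some t from by rw [ha]]
          simp [htne]
        rw [hstep, ih]
        have hwheel : wheelB (m + 1) ((tks.filter (fun t => decide (t ∉ sel))).map pairB) cov
            = t :: wheelB m ((tks.filter (fun u => decide (u ∉ sel ++ [t]))).map pairB)
                (PySem.Set.update cov (PySem.List.combinations t 3)) := by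
          conv_lhs => rw [wheelB]
          rw [if_neg hmapne, hbmax]
          show t :: wheelB m
              (((tks.filter (fun u => decide (u ∉ sel))).map pairB).filter
                (fun p => decide (p.1 ≠ t)))
              (PySem.Set.union cov (pairB t).2) = _
          rw [remaining_step, covered_eq]
        rw [hwheel]
        simp
-- (i+1) % L from i % L
lemma mod_succ_char (i L : Nat) (hL : 0 < L) :
    (i + 1) % L = if i % L + 1 = L then 0 else i % L + 1 := by
  rcases Nat.lt_or_ge 1 L with h2 | h1
  · rw [Nat.add_mod i 1 L, Nat.mod_eq_of_lt h2]
    by_cases hc : i % L + 1 = L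
    · simp [hc, Nat.mod_self]
    · have : i % L + 1 < L := by have := Nat.mod_lt i hL; omega
      simp [hc, Nat.mod_eq_of_lt this]
  · have : L = 1 := by omega
    subst this
    simp [Nat.mod_one]

-- A's enumerate/modulo tail equals B's cycle-zip, for a non-empty special pool
lemma tail_eq (sp : List Int) (hsp : sp ≠ []) :
    ∀ (ch : List (List Int)) (i : Nat),
      (PySem.List.enumerate ch (i : Int)).map
          (fun p => (p.2, PySem.List.pyGetD sp (PySem.Int.mod p.1 (PySem.List.len sp)) 0))
        = cycleZip sp ch (sp.drop (i % sp.length)) := by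
  intro ch
  induction ch with
  | nil => intro i; simp [PySem.List.enumerate, cycleZip]
  | cons t ts ih =>
    intro i
    have hL : 0 < sp.length := List.length_pos_iff.mpr hsp
    have hr : i % sp.length < sp.length := Nat.mod_lt i hL
    have hhead : PySem.List.pyGetD sp (PySem.Int.mod (i : Int) (PySem.List.len sp)) 0
        = sp[i % sp.length] := by
      show PySem.List.pyGetD sp (PySem.Int.mod (i : Int) ((sp.length : Nat) : Int)) 0 = _
      rw [PySem.Int.mod_natCast, PySem.List.pyGetD_natCast, List.getD_eq_getElem sp 0 hr]
    rw [List.drop_eq_getElem_cons hr]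
    have henum : PySem.List.enumerate (t :: ts) (i : Int)
        = ((i : Int), t) :: PySem.List.enumerate ts ((i : Int) + 1) := rfl
    rw [henum, List.map_cons, cycleZip]
    congr 1
    · simpa using hhead
    · have hnext : (if sp.drop (i % sp.length + 1) = [] then sp else sp.drop (i % sp.length + 1))
          = sp.drop ((i + 1) % sp.length) := by
        rw [mod_succ_char i sp.length hL]
        by_cases hc : i % sp.length + 1 = sp.length
        · have : sp.drop (i % sp.length + 1) = [] := by
            rw [hc]; exact List.drop_length
          simp [hc]
        · have : ¬ sp.drop (i % sp.length + 1) = [] := by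
            rw [List.drop_eq_nil_iff]
            have := Nat.mod_lt i hL
            omega
          simp [hc, this]
      rw [hnext]
      have := ih (i + 1)
      simpa using this

-- ===== VERDICT (by name: the statement is the Claim_ definition above) =====
theorem generate_wheeled_tickets_spec : Claim_equal_generate_wheeled_tickets := by
  intro pool special_pool num_tickets numbers_per_ticket _hdom hpre
  unfold Spec_generate_wheeled_tickets
  unfold generate_wheeled_tickets generate_wheeled_tickets_alt
  dsimp only
  set tks := PySem.List.combinations pool numbers_per_ticket.toNat with htks
  have ht : ∀ t ∈ tks, t ≠ [] := by
    intro t hmem hnil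
    have hl := PySem.List.length_of_mem_combinations hmem
    rw [hnil] at hl
    simp at hl
    have := hpre.1
    omega
  set n := (min num_tickets (PySem.List.len tks)).toNat with hn
  have hchosen : ((List.range n).foldl (fun st _ => stepA tks st) ([], PySem.Set.empty)).1
      = wheelB n (tks.map pairB) PySem.Set.empty := by
    have := loop_eq tks ht n [] PySem.Set.empty
    simpa using this
  rw [hchosen]
  rcases hpre.2 with hsp | hz
  · -- special_pool nonempty: the two tails agree
    have := tail_eq special_pool hsp (wheelB n (tks.map pairB) PySem.Set.empty) 0
    simpa using this
  · -- special_pool may be empty, but then no ticket is ever selected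
    have hn0 : n = 0 := by
      rcases hz with hnum | hpool
      · have : min num_tickets (PySem.List.len tks) ≤ 0 := le_trans (min_le_left _ _) hnum
        omega
      · have hcomb : tks = [] := by
          rw [htks]
          apply PySem.List.combinations_eq_nil_of_length_lt
          have := hpre.1
          omega
        rw [hn, hcomb]
        simp [PySem.List.len]
    rw [hn0]
    simp [wheelB, cycleZip]
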